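-- pv_equiv track=rewrite | github.com/jangg7725-a11y/unteim_root | engine/flow_commentary.py | _dominant_and_weak
-- ===== SOURCE A (Python) =====
-- from typing import Any, Dict, List, Optional, Tuple
--
-- def _dominant_and_weak(counts: Dict[str, int]) -> Tuple[List[str], List[str]]:
--     # 가장 큰 값 / 가장 작은 값(0 포함) 추려서 리턴
--     if not counts:
--         return [], []
--     items = sorted(counts.items(), key=lambda x: x[1], reverse=True)
--     maxv = items[0][1]
--     minv = min(v for _, v in items)
--
--     dominant = [k for k, v in items if v == maxv and maxv > 0]
--     weak = [k for k, v in items if v == minv]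
--     return dominant, weak
-- ===== SOURCE B (Python) =====
-- from typing import Dict, List, Tuple
--
-- def _dominant_and_weak(counts: Dict[str, int]) -> Tuple[List[str], List[str]]:
--     # One pass: partition keys into classes by their count value, then look up
--     # the extreme classes directly (no sort, no filter scans).
--     groups: Dict[int, List[str]] = {}
--     for k, v in counts.items():
--         groups.setdefault(v, []).append(k)
--     if not groups:
--         return [], []
--     maxv = max(groups)
--     minv = min(groups)
--     return (groups[maxv] if maxv > 0 else []), groups[minv]
-- ===== Notes on version B (the rewrite author's own statement) =====
-- stated objective: alternative
-- what changed: Replaces sort-then-two-filter-scans by a single pass that partitions keys into a value-keyed groups dict, then returns the groups at max/min value directly (stable sort + filter order equals insertion order within a value class).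
import Mathlib
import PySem

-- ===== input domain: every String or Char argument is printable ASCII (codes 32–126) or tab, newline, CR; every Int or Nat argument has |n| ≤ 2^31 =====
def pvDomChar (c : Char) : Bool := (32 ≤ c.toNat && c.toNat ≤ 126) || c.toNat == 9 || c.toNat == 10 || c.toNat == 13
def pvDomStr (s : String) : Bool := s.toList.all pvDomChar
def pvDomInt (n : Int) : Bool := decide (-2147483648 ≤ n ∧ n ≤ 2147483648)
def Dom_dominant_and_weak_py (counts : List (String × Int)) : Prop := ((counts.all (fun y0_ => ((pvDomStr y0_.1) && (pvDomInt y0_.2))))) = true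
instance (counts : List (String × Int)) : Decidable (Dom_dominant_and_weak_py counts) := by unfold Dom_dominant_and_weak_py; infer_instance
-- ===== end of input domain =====

-- ===== PORT A =====
-- B changes the algorithm (partition by value instead of sort + filter scans); equal output, no speed claim.
def dominant_and_weak_py (counts : List (String × Int)) : List String × List String :=
  if counts.isEmpty then ([], [])
  else
    let items := PySem.List.sorted counts (fun x => x.2) true
    -- items[0][1]: items is nonempty here, so pyGet? returns some; the default is unreachable
    let maxv := ((PySem.List.pyGet? items 0).getD ("", 0)).2
    -- min(v for _, v in items): nonempty here, so min? returns some; the default is unreachable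
    let minv := (PySem.List.min? (items.map (fun p => p.2)) (fun v => v)).getD 0
    let dominant := (items.filter (fun p => p.2 == maxv && decide (maxv > 0))).map (fun p => p.1)
    let weak := (items.filter (fun p => p.2 == minv)).map (fun p => p.1)
    (dominant, weak)

-- ===== PORT B =====
def dominant_and_weak_py_alt (counts : List (String × Int)) : List String × List String :=
  let groups := counts.foldl
    (fun (d : PySem.Dict Int (List String)) p => d.modify p.2 [] (fun g => g ++ [p.1]))
    PySem.Dict.empty
  if groups.items.isEmpty then ([], [])
  else
    -- max/min over the dict keys: nonempty here, so max?/min? return some; the default is unreachable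
    let maxv := (PySem.List.max? groups.keys (fun v => v)).getD 0
    let minv := (PySem.List.min? groups.keys (fun v => v)).getD 0
    ((if maxv > 0 then groups.getD maxv [] else []), groups.getD minv [])

-- ===== PRECONDITION & SPEC =====
def Spec_dominant_and_weak_py (counts : List (String × Int)) (out : List String × List String) : Prop := out = dominant_and_weak_py_alt counts
instance (counts : List (String × Int)) (out : List String × List String) : Decidable (Spec_dominant_and_weak_py counts out) := by unfold Spec_dominant_and_weak_py; infer_instance

-- ===== CLAIM (what is proved, stated in full; the proofs are below) =====
def Claim_equal_dominant_and_weak_py : Prop := ∀ (counts : List (String × Int)), Dom_dominant_and_weak_py counts → Spec_dominant_and_weak_py counts (dominant_and_weak_py counts)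

-- ===== LEMMAS AND PROOFS =====

-- insertBy with the reverse comparator preserves descending order of the values
lemma pairwise_insertBy (x : String × Int) (ys : List (String × Int))
    (hs : ys.Pairwise (fun a b => b.2 ≤ a.2)) :
    (PySem.List.insertBy (fun a b => decide (b.2 < a.2)) x ys).Pairwise (fun a b => b.2 ≤ a.2) := by
  induction ys with
  | nil => simp [PySem.List.insertBy]
  | cons y t ih =>
    rw [List.pairwise_cons] at hs
    simp only [PySem.List.insertBy]
    split_ifs with h
    · simp only [decide_eq_true_eq] at h
      refine List.Pairwise.cons ?_ (List.Pairwise.cons hs.1 hs.2)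
      intro b hb
      simp only [List.mem_cons] at hb
      rcases hb with rfl | hb
      · omega
      · have := hs.1 b hb; omega
    · refine List.Pairwise.cons ?_ (ih hs.2)
      intro b hb
      rcases (PySem.List.mem_insertBy _ _ _ _).1 hb with rfl | hb
      · simp only [decide_eq_true_eq] at h; omega
      · exact hs.1 b hb


-- Inserting into a descending-by-value list with the reverse comparator puts x after every
-- element of its own value class, so filtering one class commutes with the insertion.
lemma filter_insertBy_class (x : String × Int) (ys : List (String × Int)) (c : Int)
    (hs : ys.Pairwise (fun a b => b.2 ≤ a.2)) :
    (PySem.List.insertBy (fun a b => decide (b.2 < a.2)) x ys).filter (fun p => p.2 == c)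
      = ys.filter (fun p => p.2 == c) ++ (if x.2 == c then [x] else []) := by
  induction ys with
  | nil =>
    simp only [PySem.List.insertBy, List.filter_cons, List.filter_nil, List.nil_append]
  | cons y t ih =>
    rw [List.pairwise_cons] at hs
    simp only [PySem.List.insertBy]
    by_cases h : (decide (y.2 < x.2)) = true
    · rw [if_pos h]
      simp only [decide_eq_true_eq] at h
      by_cases hx : (x.2 == c) = true
      · have hxc : x.2 = c := by simpa using hx
        have hy : ¬ (y.2 == c) = true := by simp only [beq_iff_eq]; omega
        have ht : List.filter (fun p => p.2 == c) t = [] := by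
          apply List.filter_eq_nil_iff.2
          intro p hp
          have := hs.1 p hp
          simp only [beq_iff_eq]; omega
        simp [hx, hy, ht]
      · simp [hx]
    · rw [if_neg h]
      simp only [List.filter_cons, ih hs.2]
      by_cases hy : (y.2 == c) = true <;> simp [hy]


-- loop invariant for the insertion-sort fold: one value class filters out in original order
lemma filter_foldl_insertBy (cs : List (String × Int)) (c : Int) :
    ∀ acc : List (String × Int), acc.Pairwise (fun a b => b.2 ≤ a.2) →
    (cs.foldl (fun acc x => PySem.List.insertBy (fun a b => decide (b.2 < a.2)) x acc) acc).filter
        (fun p => p.2 == c)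
      = acc.filter (fun p => p.2 == c) ++ cs.filter (fun p => p.2 == c) := by
  induction cs with
  | nil => intro acc _; simp
  | cons x t ih =>
    intro acc hacc
    simp only [List.foldl_cons]
    rw [ih _ (pairwise_insertBy x acc hacc), filter_insertBy_class x acc c hacc,
        List.filter_cons]
    by_cases hx : (x.2 == c) = true <;> simp [hx]


-- Stability: filtering one value class of the descending sort gives the original-order class.
lemma filter_sorted_rev (counts : List (String × Int)) (c : Int) :
    (PySem.List.sorted counts (fun x => x.2) true).filter (fun p => p.2 == c)
      = counts.filter (fun p => p.2 == c) := by
  rw [PySem.List.sorted_rev_eq_foldl_insertBy]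
  simpa using filter_foldl_insertBy counts c [] (by simp)


-- B's groups dict: lookup at c is exactly the original-order value class of c.
lemma groups_getD (counts : List (String × Int)) (c : Int) :
    (counts.foldl
      (fun (d : PySem.Dict Int (List String)) p => d.modify p.2 [] (fun g => g ++ [p.1]))
      PySem.Dict.empty).getD c []
      = (counts.filter (fun p => p.2 == c)).map (fun p => p.1) := by
  have h := PySem.Dict.getD_foldl_modify_append (counts.map (fun p => (p.2, p.1)))
      (PySem.Dict.empty : PySem.Dict Int (List String)) c
  rw [List.foldl_map] at h
  simp only [PySem.Dict.getD_empty, List.nil_append] at h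
  rw [h, List.filter_map]
  simp [Function.comp_def, List.map_map]


-- B's groups dict: its key list has the same members as the value list of counts.
lemma groups_keys_mem (counts : List (String × Int)) (c : Int) :
    c ∈ (counts.foldl
      (fun (d : PySem.Dict Int (List String)) p => d.modify p.2 [] (fun g => g ++ [p.1]))
      PySem.Dict.empty).keys ↔ c ∈ counts.map (fun p => p.2) := by
  rw [PySem.Dict.keys_foldl_modify_key counts (fun p => p.2) [] (fun d p g => g ++ [p.1])]
  simp [pysem]

-- the two ports agree on every input
lemma ab_eq (counts : List (String × Int)) :
    dominant_and_weak_py counts = dominant_and_weak_py_alt counts := by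
  rcases counts with _ | ⟨x, t⟩
  · rfl
  set counts := x :: t with hc
  have hce : counts.isEmpty = false := by rw [hc]; rfl
  unfold dominant_and_weak_py dominant_and_weak_py_alt
  simp only [hce, Bool.false_eq_true, if_false]
  set groups := counts.foldl
    (fun (d : PySem.Dict Int (List String)) p => d.modify p.2 [] (fun g => g ++ [p.1]))
    PySem.Dict.empty with hg
  -- groups is nonempty
  have hkx : x.2 ∈ groups.keys := by
    rw [hg, groups_keys_mem]; simp [hc]
  have hkeys_ne : groups.keys ≠ [] := by
    intro h; rw [h] at hkx; exact (List.not_mem_nil) hkx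
  have hitems_ne : groups.items.isEmpty = false := by
    have : groups.keys = groups.items.map (fun p => p.1) := rfl
    cases hi : groups.items with
    | nil => exact absurd (by rw [this, hi]; rfl) hkeys_ne
    | cons a b => rfl
  rw [hitems_ne]
  simp only [Bool.false_eq_true, if_false]
  -- A side: items
  have hsne : PySem.List.sorted counts (fun x => x.2) true ≠ [] := by
    rw [Ne, PySem.List.sorted_eq_nil_iff]; simp [hc]
  obtain ⟨m, r, hitems⟩ := List.exists_cons_of_ne_nil hsne
  -- m.2 is the max of the values
  have hmmem : m ∈ counts := by
    have : m ∈ PySem.List.sorted counts (fun x => x.2) true := by rw [hitems]; simp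
    exact (PySem.List.mem_sorted _ _ _ _).1 this
  have hmmax : ∀ y ∈ counts, y.2 ≤ m.2 :=
    PySem.List.key_head_sorted_rev_ge counts (fun x => x.2) hitems
  -- B side maxv
  obtain ⟨M, hM⟩ : ∃ M, PySem.List.max? groups.keys (fun v => v) = some M := by
    cases h : PySem.List.max? groups.keys (fun v => v) with
    | none => exact absurd ((PySem.List.max?_eq_none_iff _ _).1 h) hkeys_ne
    | some M => exact ⟨M, rfl⟩
  have hMmem : M ∈ counts.map (fun p => p.2) := by
    rw [← groups_keys_mem, ← hg]; exact PySem.List.max?_mem hM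
  have hMmax : ∀ v ∈ groups.keys, v ≤ M := PySem.List.max?_isMax hM
  have hMeq : M = m.2 := by
    obtain ⟨y, hy, hy2⟩ := List.mem_map.1 hMmem
    have h1 : M ≤ m.2 := hy2 ▸ hmmax y hy
    have h2 : m.2 ≤ M := hMmax m.2 (by rw [hg, groups_keys_mem]; exact List.mem_map_of_mem hmmem)
    omega
  -- minv on both sides
  have hvals_ne : (PySem.List.sorted counts (fun x => x.2) true).map (fun p => p.2) ≠ [] := by
    rw [hitems]; simp
  obtain ⟨mn, hmn⟩ : ∃ mn, PySem.List.min?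
      ((PySem.List.sorted counts (fun x => x.2) true).map (fun p => p.2)) (fun v => v) = some mn := by
    cases h : PySem.List.min? ((PySem.List.sorted counts (fun x => x.2) true).map (fun p => p.2)) (fun v => v) with
    | none => exact absurd ((PySem.List.min?_eq_none_iff _ _).1 h) hvals_ne
    | some mn => exact ⟨mn, rfl⟩
  have hmem_vals : ∀ v : Int, v ∈ (PySem.List.sorted counts (fun x => x.2) true).map (fun p => p.2)
      ↔ v ∈ counts.map (fun p => p.2) := by
    intro v
    constructor <;> intro h <;> obtain ⟨y, hy, hy2⟩ := List.mem_map.1 h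
    · exact List.mem_map.2 ⟨y, (PySem.List.mem_sorted _ _ _ _).1 hy, hy2⟩
    · exact List.mem_map.2 ⟨y, (PySem.List.mem_sorted _ _ _ _).2 hy, hy2⟩
  have hmnmem : mn ∈ counts.map (fun p => p.2) := (hmem_vals mn).1 (PySem.List.min?_mem hmn)
  have hmnmin : ∀ v ∈ counts.map (fun p => p.2), mn ≤ v := by
    intro v hv
    exact PySem.List.min?_isMin hmn v ((hmem_vals v).2 hv)
  obtain ⟨N, hN⟩ : ∃ N, PySem.List.min? groups.keys (fun v => v) = some N := by
    cases h : PySem.List.min? groups.keys (fun v => v) with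
    | none => exact absurd ((PySem.List.min?_eq_none_iff _ _).1 h) hkeys_ne
    | some N => exact ⟨N, rfl⟩
  have hNmem : N ∈ counts.map (fun p => p.2) := by
    rw [← groups_keys_mem, ← hg]; exact PySem.List.min?_mem hN
  have hNeq : N = mn := by
    have h1 : mn ≤ N := hmnmin N hNmem
    have h2 : N ≤ mn := PySem.List.min?_isMin hN mn (by rw [hg, groups_keys_mem]; exact hmnmem)
    omega
  -- assemble
  have hget : PySem.List.pyGet? (PySem.List.sorted counts (fun x => x.2) true) 0 = some m := by
    rw [hitems]; simp [PySem.List.pyGet?, PySem.List.pyIdx?]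
  rw [hM, hN, hmn]
  simp only [Option.getD_some, hNeq, hMeq, Prod.mk.injEq, hget]
  refine ⟨?_, ?_⟩
  · show List.map (fun p => p.1)
        (List.filter (fun p => p.2 == m.2 && decide (m.2 > 0)) (PySem.List.sorted counts (fun x => x.2) true))
        = (if m.2 > 0 then groups.getD m.2 [] else [])
    by_cases hpos : m.2 > 0
    · rw [if_pos hpos]
      have hfil : (fun p : String × Int => p.2 == m.2 && decide (m.2 > 0))
           = (fun p : String × Int => p.2 == m.2) := by
        funext p; simp [hpos]
      rw [hfil, filter_sorted_rev, hg, groups_getD]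
    · rw [if_neg hpos]
      have hfil : (PySem.List.sorted counts (fun x => x.2) true).filter
          (fun p => p.2 == m.2 && decide (m.2 > 0)) = [] := by
        apply List.filter_eq_nil_iff.2
        intro p _
        simp [hpos]
      rw [hfil]; rfl
  · show List.map (fun p => p.1)
        (List.filter (fun p => p.2 == mn) (PySem.List.sorted counts (fun x => x.2) true))
        = groups.getD mn []
    rw [filter_sorted_rev, hg, groups_getD]

-- ===== VERDICT (by name: the statement is the Claim_ definition above) =====
theorem dominant_and_weak_py_spec : Claim_equal_dominant_and_weak_py := by
  intro counts _
  unfold Spec_dominant_and_weak_py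
  exact ab_eq counts
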